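-- pv_equiv track=rewrite | github.com/hackharvard/tools | diet_restrictions.py | count_diet_restrictions
-- ===== SOURCE A (Python) =====
-- def count_diet_restrictions(diet_restrictions : dict) -> dict:
--     """
--     Returns a dict of diet restrictions and num of people with that restriction
--     """
--     count = {}
--     for _, restriction in diet_restrictions.items():
--         diets = restriction["dietaryRestrictions"]
--
--         # Since all vegans are vegetarians, count them as only vegans, not both
--         if "vegan" in diets and "vegetarian" in diets:
--             if 'vegan' in count:
--                 count['vegan'] += 1
--             else:
--                 count['vegan'] = 1
--             continue
--
--         # Count all other diet restrictions
--         for diet in diets: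
--             if diet in count:
--                 count[diet] += 1
--             else:
--                 count[diet] = 1
--
--     return count
-- ===== SOURCE B (Python) =====
-- def count_diet_restrictions(diet_restrictions : dict) -> dict:
--     """
--     Returns a dict of diet restrictions and num of people with that restriction
--     """
--     # Stage 1: flatten everyone's effective restrictions into one list
--     # (vegan+vegetarian collapses to just ['vegan'], dropping the rest, as in A).
--     flat = []
--     for restriction in diet_restrictions.values():
--         diets = restriction["dietaryRestrictions"]
--         flat.extend(["vegan"] if "vegan" in diets and "vegetarian" in diets else diets)
--     # Stage 2: count each distinct diet (first-occurrence order) with list.count.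
--     return {diet: flat.count(diet) for diet in dict.fromkeys(flat)}
-- ===== Notes on version B (the rewrite author's own statement) =====
-- stated objective: alternative
-- what changed: B is a staged map-then-aggregate: it first flattens every person's effective restriction list (['vegan'] when both vegan and vegetarian appear, else the list unchanged) into one list, then deduplicates it with dict.fromkeys and builds the result by counting each distinct diet with list.count, instead of A's single pass maintaining an incrementally updated counting dict with a continue and duplicated branchy updates.
import Mathlib
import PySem

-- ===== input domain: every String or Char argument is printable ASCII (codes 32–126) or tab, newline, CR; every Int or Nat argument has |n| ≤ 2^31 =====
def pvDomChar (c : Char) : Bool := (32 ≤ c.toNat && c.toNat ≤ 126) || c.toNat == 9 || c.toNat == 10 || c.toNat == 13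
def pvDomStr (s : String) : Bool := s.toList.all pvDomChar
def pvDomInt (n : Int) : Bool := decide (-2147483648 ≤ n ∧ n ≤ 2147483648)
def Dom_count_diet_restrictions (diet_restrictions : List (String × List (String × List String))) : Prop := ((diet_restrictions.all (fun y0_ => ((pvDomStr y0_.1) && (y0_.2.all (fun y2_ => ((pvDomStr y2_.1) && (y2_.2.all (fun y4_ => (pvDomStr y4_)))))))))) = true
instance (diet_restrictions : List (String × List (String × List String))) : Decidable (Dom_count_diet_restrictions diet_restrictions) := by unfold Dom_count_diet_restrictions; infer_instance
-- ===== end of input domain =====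

-- B is a staged map-then-aggregate (flatten effective lists, dedupe, count each key with
-- list.count) instead of A's single pass maintaining an incrementally updated counting dict.


-- ===== PORT A =====
-- A's loop over .items(): the vegan+vegetarian branch bumps only 'vegan' and continues,
-- otherwise the inner loop bumps every diet, each with the branchy if-in-count update.
def count_diet_restrictions (diet_restrictions : List (String × List (String × List String))) : List (String × Int) :=
  (diet_restrictions.foldl (fun count p =>
      let diets := (PySem.Dict.mk p.2).getD "dietaryRestrictions" []  -- KeyError excluded by Pre_
      if diets.contains "vegan" && diets.contains "vegetarian" then
        if count.contains "vegan" then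
          count.insert "vegan" (count.getD "vegan" 0 + 1)
        else
          count.insert "vegan" 1
      else
        diets.foldl (fun c d =>
          if c.contains d then c.insert d (c.getD d 0 + 1) else c.insert d 1) count)
    PySem.Dict.empty).items

-- ===== PORT B =====
-- Stage 1: flatten the effective lists with extend; stage 2: dedup and count with list.count.
def count_diet_restrictions_alt (diet_restrictions : List (String × List (String × List String))) : List (String × Int) :=
  let flat := diet_restrictions.foldl (fun acc p =>
      let diets := (PySem.Dict.mk p.2).getD "dietaryRestrictions" []  -- KeyError excluded by Pre_
      acc ++ (if diets.contains "vegan" && diets.contains "vegetarian" then ["vegan"] else diets)) []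
  (PySem.List.dedup flat).map (fun diet => (diet, (flat.count diet : Int)))

-- ===== PRECONDITION & SPEC =====
-- Pre_ excludes exactly the inputs where A raises KeyError: some person's record
-- lacks the "dietaryRestrictions" key.
def Pre_count_diet_restrictions (diet_restrictions : List (String × List (String × List String))) : Prop :=
  ∀ p ∈ diet_restrictions, (PySem.Dict.mk p.2).contains "dietaryRestrictions" = true
instance (diet_restrictions : List (String × List (String × List String))) : Decidable (Pre_count_diet_restrictions diet_restrictions) := by unfold Pre_count_diet_restrictions; infer_instance
def pvWitness_count_diet_restrictions : (List (String × List (String × List String))) :=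
  [("alice", [("dietaryRestrictions", ["vegan", "vegetarian", "gluten-free"])]),
   ("bob", [("dietaryRestrictions", ["gluten-free", "halal"])])]

def Spec_count_diet_restrictions (diet_restrictions : List (String × List (String × List String))) (out : List (String × Int)) : Prop := out = count_diet_restrictions_alt diet_restrictions
instance (diet_restrictions : List (String × List (String × List String))) (out : List (String × Int)) : Decidable (Spec_count_diet_restrictions diet_restrictions out) := by unfold Spec_count_diet_restrictions; infer_instance

-- ===== CLAIM (what is proved, stated in full; the proofs are below) =====
def Claim_equal_count_diet_restrictions : Prop := ∀ (diet_restrictions : List (String × List (String × List String))), Dom_count_diet_restrictions diet_restrictions → Pre_count_diet_restrictions diet_restrictions → Spec_count_diet_restrictions diet_restrictions (count_diet_restrictions diet_restrictions)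

-- ===== LEMMAS AND PROOFS =====

-- the effective list of one person
def effList (p : String × List (String × List String)) : List String :=
  let diets := (PySem.Dict.mk p.2).getD "dietaryRestrictions" []
  if diets.contains "vegan" && diets.contains "vegetarian" then ["vegan"] else diets

-- A's branchy dict update equals the uniform counting update.
theorem bump_eq (c : PySem.Dict String Int) (d : String) :
    (if c.contains d then c.insert d (c.getD d 0 + 1) else c.insert d 1)
      = c.insert d (c.getD d 0 + 1) := by
  by_cases h : c.contains d = true
  · simp [h]
  · simp only [Bool.not_eq_true] at h
    rw [if_neg (by simp [h]), PySem.Dict.getD_of_not_contains (h := h)]; norm_num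

-- foldl only depends on the step function pointwise.
theorem foldl_congr_fn {α β : Type} (l : List α) (f g : β → α → β) (c : β)
    (h : ∀ c x, f c x = g c x) : l.foldl f c = l.foldl g c := by
  induction l generalizing c with
  | nil => rfl
  | cons x xs ih => simp only [List.foldl_cons, h c x]; exact ih _

-- counting fold over a flatMap = the nested loop.
theorem foldl_flatMap_counter {α β γ : Type} (g : γ → β → γ)
    (f : α → List β) (l : List α) (c : γ) :
    (l.flatMap f).foldl g c = l.foldl (fun c a => (f a).foldl g c) c := by
  induction l generalizing c with
  | nil => rfl
  | cons x xs ih => simp [List.flatMap_cons, List.foldl_append, ih]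

-- A's per-person step = fold of the uniform bump over the effective list.
theorem step_eq (c : PySem.Dict String Int) (p : String × List (String × List String)) :
    (let diets := (PySem.Dict.mk p.2).getD "dietaryRestrictions" []
     if diets.contains "vegan" && diets.contains "vegetarian" then
       if c.contains "vegan" then c.insert "vegan" (c.getD "vegan" 0 + 1)
       else c.insert "vegan" 1
     else
       diets.foldl (fun c d =>
         if c.contains d then c.insert d (c.getD d 0 + 1) else c.insert d 1) c)
      = (effList p).foldl (fun c d => c.insert d (c.getD d 0 + 1)) c := by
  unfold effList
  by_cases h : ((PySem.Dict.mk p.2).getD "dietaryRestrictions" []).contains "vegan"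
      && ((PySem.Dict.mk p.2).getD "dietaryRestrictions" []).contains "vegetarian"
  · simp only [h, if_true, List.foldl_cons, List.foldl_nil, bump_eq]
  · simp only [h]
    exact foldl_congr_fn _ _ _ c (fun c d => bump_eq c d)

-- B's stage-1 accumulator fold builds the flatMap of effective lists.
theorem flat_eq (l : List (String × List (String × List String))) :
    (l.foldl (fun acc p =>
        let diets := (PySem.Dict.mk p.2).getD "dietaryRestrictions" []
        acc ++ (if diets.contains "vegan" && diets.contains "vegetarian" then ["vegan"] else diets)) [])
      = l.flatMap effList := by
  have := PySem.List.foldl_append_eq_flatMap (g := effList) (l := l) (acc := ([] : List String))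
  simpa [effList] using this

-- ===== VERDICT (by name: the statement is the Claim_ definition above) =====
theorem count_diet_restrictions_spec : Claim_equal_count_diet_restrictions := by
  intro l _ _
  unfold Spec_count_diet_restrictions count_diet_restrictions count_diet_restrictions_alt
  have h1 : (l.foldl (fun count p =>
      let diets := (PySem.Dict.mk p.2).getD "dietaryRestrictions" []
      if diets.contains "vegan" && diets.contains "vegetarian" then
        if count.contains "vegan" then count.insert "vegan" (count.getD "vegan" 0 + 1)
        else count.insert "vegan" 1
      else
        diets.foldl (fun c d =>
          if c.contains d then c.insert d (c.getD d 0 + 1) else c.insert d 1) count)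
      (PySem.Dict.empty : PySem.Dict String Int))
      = (l.flatMap effList).foldl (fun c d => c.insert d (c.getD d 0 + 1)) PySem.Dict.empty := by
    rw [foldl_flatMap_counter]
    exact foldl_congr_fn _ _ _ _ (fun c p => step_eq c p)
  have h2 := congrArg PySem.Dict.items h1
  rw [PySem.Dict.foldl_insert_getD_add_one_eq_counter, PySem.Dict.items_counter] at h2
  have step : (fun flat : List String => (PySem.List.dedup flat).map (fun diet => (diet, (flat.count diet : Int)))) (l.flatMap effList)
      = (PySem.Set.ofList (l.flatMap effList)).map (fun k => (k, ((l.flatMap effList).count k : Int))) := by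
    simp [PySem.List.dedup_eq_ofList]
  exact h2.trans ((congrArg (fun flat : List String => (PySem.List.dedup flat).map (fun diet => (diet, (flat.count diet : Int)))) (flat_eq l)).trans step).symm
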